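-- pv_equiv track=rewrite | github.com/ashipiling/Rosalind_Answers | LCSQ_FindingaSharedSplicedMotif.py | sort_DNA
-- ===== SOURCE A (Python) =====
-- def sort_DNA(dnalist,dict):
--     sort_list = [0 for i in range(len(dnalist[1]))]
--
--     for i in range(len(dnalist[0])):
--         for j in range(len(dnalist[1])):
--             n = 0
--             if dnalist[0][i] == dnalist[1][j]:
--                 n += 1
--                 if n > dict[dnalist[0][i]]:
--                     sort_list[j] += max(sort_list) + 1
--         dict[dnalist[0][i]] += 1
--     return sort_list
-- ===== SOURCE B (Python) =====
-- def sort_DNA(dnalist, dict):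
--     # Return-value equivalent rewrite; unlike A it does not mutate `dict` in place.
--     s, t = dnalist[0], dnalist[1]
--     sort_list = [0] * len(t)
--     cur = 0          # running maximum of sort_list (all entries stay >= 0)
--     seen = {}
--     for ch in s:
--         if dict[ch] + seen.get(ch, 0) < 1:
--             for j, tj in enumerate(t):
--                 if tj == ch:
--                     sort_list[j] += cur + 1
--                     cur = sort_list[j]
--         seen[ch] = seen.get(ch, 0) + 1
--     return sort_list
-- ===== Notes on version B (the rewrite author's own statement) =====
-- stated objective: faster
-- what changed: B drops A's per-update max(sort_list) rescan by maintaining a running maximum (every qualifying write strictly exceeds the previous maximum), and skips whole non-triggering rows using a separate occurrence counter instead of mutating the input dict.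
import Mathlib
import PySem

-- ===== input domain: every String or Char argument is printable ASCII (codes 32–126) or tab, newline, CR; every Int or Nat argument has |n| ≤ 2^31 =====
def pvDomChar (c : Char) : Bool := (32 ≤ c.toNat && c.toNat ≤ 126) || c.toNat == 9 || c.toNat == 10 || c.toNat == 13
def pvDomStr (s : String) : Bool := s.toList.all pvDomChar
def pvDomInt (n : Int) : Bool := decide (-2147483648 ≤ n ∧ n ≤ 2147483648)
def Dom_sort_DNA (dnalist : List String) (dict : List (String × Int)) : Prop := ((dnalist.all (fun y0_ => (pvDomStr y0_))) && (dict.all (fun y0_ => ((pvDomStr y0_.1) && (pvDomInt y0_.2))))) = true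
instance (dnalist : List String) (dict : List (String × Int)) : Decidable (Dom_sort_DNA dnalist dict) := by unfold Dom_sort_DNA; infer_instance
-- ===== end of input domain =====

-- B replaces A's per-update max(sort_list) scan by a running maximum and skips whole
-- non-triggering rows via a separate occurrence counter (A mutates `dict` in place; B
-- does not — the equivalence proved here is about the RETURN value only).

-- ===== PORT A =====
def sort_DNA (dnalist : List String) (dict : List (String × Int)) : List Int :=
  let s := ((PySem.List.pyGet? dnalist 0).getD "").toList
  let t := ((PySem.List.pyGet? dnalist 1).getD "").toList
  let sort_list : List Int := (List.range t.length).map (fun _ => (0 : Int))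
  let r := s.foldl
    (fun (st : List Int × PySem.Dict String Int) c =>
      let sl := (List.range t.length).foldl
        (fun sl j =>
          let n : Int := 0
          if t.getD j ' ' = c then
            let n := n + 1
            if n > (st.2.get? (String.ofList [c])).getD 0 then
              sl.set j (sl.getD j 0 + ((PySem.List.max? sl (fun x => x)).getD 0 + 1))
            else sl
          else sl)
        st.1
      (sl, st.2.insert (String.ofList [c]) ((st.2.get? (String.ofList [c])).getD 0 + 1)))
    (sort_list, PySem.Dict.ofList dict)
  r.1

-- ===== PORT B =====
def sort_DNA_alt (dnalist : List String) (dict : List (String × Int)) : List Int :=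
  let s := ((PySem.List.pyGet? dnalist 0).getD "").toList
  let t := ((PySem.List.pyGet? dnalist 1).getD "").toList
  let d0 := PySem.Dict.ofList dict
  let r := s.foldl
    (fun (st : List Int × Int × PySem.Dict String Int) ch =>
      let key := String.ofList [ch]
      let p :=
        if (d0.get? key).getD 0 + st.2.2.getD key 0 < 1 then
          (List.range t.length).foldl
            (fun (p : List Int × Int) j =>
              if t.getD j ' ' = ch then
                let v := p.1.getD j 0 + p.2 + 1
                (p.1.set j v, v)
              else p)
            (st.1, st.2.1)
        else (st.1, st.2.1)
      (p.1, p.2, st.2.2.insert key (st.2.2.getD key 0 + 1)))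
    (List.replicate t.length (0 : Int), 0, PySem.Dict.empty)
  r.1

-- ===== PRECONDITION & SPEC =====
-- Pre_ excludes exactly the inputs on which the Python A raises: fewer than two strings
-- in dnalist (IndexError) or a character of dnalist[0] missing from dict (KeyError).
def Pre_sort_DNA (dnalist : List String) (dict : List (String × Int)) : Prop :=
  2 ≤ dnalist.length ∧
  ((dnalist.getD 0 "").toList.all (fun c => dict.any (fun p => p.1.toList == [c]))) = true
instance (dnalist : List String) (dict : List (String × Int)) : Decidable (Pre_sort_DNA dnalist dict) := by unfold Pre_sort_DNA; infer_instance

def pvWitness_sort_DNA : List String × (List (String × Int)) :=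
  (["ACGT", "CAT"], [("A", 0), ("C", 1), ("G", 0), ("T", 0)])

def Spec_sort_DNA (dnalist : List String) (dict : List (String × Int)) (out : List Int) : Prop := out = sort_DNA_alt dnalist dict
instance (dnalist : List String) (dict : List (String × Int)) (out : List Int) : Decidable (Spec_sort_DNA dnalist dict out) := by unfold Spec_sort_DNA; infer_instance

-- ===== CLAIM (what is proved, stated in full; the proofs are below) =====
def Claim_equal_sort_DNA : Prop := ∀ (dnalist : List String) (dict : List (String × Int)), Dom_sort_DNA dnalist dict → Pre_sort_DNA dnalist dict → Spec_sort_DNA dnalist dict (sort_DNA dnalist dict)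

-- ===== LEMMAS AND PROOFS =====

-- maxD sl = max(sl) with 0 for the empty list (only used on nonempty lists / all-zero lists)
def pvMaxD (sl : List Int) : Int := (PySem.List.max? sl (fun x => x)).getD 0

lemma pvMaxD_all_zero (sl : List Int) (h : ∀ x ∈ sl, x = 0) : pvMaxD sl = 0 := by
  unfold pvMaxD
  cases hm : PySem.List.max? sl (fun x => x) with
  | none => rfl
  | some m => simpa using h m (PySem.List.max?_mem hm)

lemma pv_le_maxD (sl : List Int) (x : Int) (hx : x ∈ sl) : x ≤ pvMaxD sl := by
  unfold pvMaxD
  cases hm : PySem.List.max? sl (fun x => x) with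
  | none =>
    rw [PySem.List.max?_eq_none_iff] at hm
    simp [hm] at hx
  | some m => simpa using PySem.List.max?_isMax hm x hx

lemma pvMaxD_set (sl : List Int) (jn : Nat) (v : Int) (hj : jn < sl.length)
    (hv : ∀ x ∈ sl, x ≤ v) : pvMaxD (sl.set jn v) = v := by
  have hne : sl.set jn v ≠ [] := by
    apply List.ne_nil_of_length_pos
    simp only [List.length_set]
    omega
  cases hm : PySem.List.max? (sl.set jn v) (fun x => x) with
  | none => exact absurd ((PySem.List.max?_eq_none_iff _ _).mp hm) hne
  | some m =>
    have hmem : m ∈ sl.set jn v := PySem.List.max?_mem hm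
    have hmle : m ≤ v := by
      rcases List.mem_or_eq_of_mem_set hmem with h | h
      · exact hv m h
      · omega
    have hvmem : v ∈ sl.set jn v := by
      have hj' : jn < (sl.set jn v).length := by simpa using hj
      have hmem' := List.getElem_mem hj'
      rw [List.getElem_set_self hj'] at hmem'
      exact hmem'
    have hvle : v ≤ m := by simpa using PySem.List.max?_isMax hm v hvmem
    unfold pvMaxD
    rw [hm]
    simp
    omega

-- a foldl whose body never changes the accumulator is the identity
lemma pv_foldl_id {α β : Type} (l : List β) (f : α → β → α) (init : α)
    (h : ∀ a b, f a b = a) : l.foldl f init = init := by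
  induction l generalizing init with
  | nil => rfl
  | cons b l ih => rw [List.foldl_cons, h]; exact ih init

-- inner loops: A's (with a fixed dict value v, 1 > v) versus B's running-max form,
-- over an arbitrary list of in-range indices
lemma pv_inner (t : List Char) (c : Char) (v : Int) (hv : (1 : Int) > v) :
    ∀ (js : List Nat) (sl : List Int) (cur : Int),
      (∀ j ∈ js, j < sl.length) →
      (∀ x ∈ sl, 0 ≤ x) →
      cur = pvMaxD sl →
      (js.foldl
          (fun sl j =>
            let n : Int := 0
            if t.getD j ' ' = c then
              let n := n + 1
              if n > v then
                sl.set j (sl.getD j 0 + ((PySem.List.max? sl (fun x => x)).getD 0 + 1))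
              else sl
            else sl)
          sl
        = (js.foldl
            (fun (p : List Int × Int) j =>
              if t.getD j ' ' = c then
                let v := p.1.getD j 0 + p.2 + 1
                (p.1.set j v, v)
              else p)
            (sl, cur)).1)
      ∧ (js.foldl
            (fun (p : List Int × Int) j =>
              if t.getD j ' ' = c then
                let v := p.1.getD j 0 + p.2 + 1
                (p.1.set j v, v)
              else p)
            (sl, cur)).2
          = pvMaxD (js.foldl
          (fun sl j =>
            let n : Int := 0
            if t.getD j ' ' = c then
              let n := n + 1
              if n > v then
                sl.set j (sl.getD j 0 + ((PySem.List.max? sl (fun x => x)).getD 0 + 1))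
              else sl
            else sl)
          sl)
      ∧ (∀ x ∈ (js.foldl
          (fun sl j =>
            let n : Int := 0
            if t.getD j ' ' = c then
              let n := n + 1
              if n > v then
                sl.set j (sl.getD j 0 + ((PySem.List.max? sl (fun x => x)).getD 0 + 1))
              else sl
            else sl)
          sl), 0 ≤ x)
      ∧ (js.foldl
          (fun sl j =>
            let n : Int := 0
            if t.getD j ' ' = c then
              let n := n + 1
              if n > v then
                sl.set j (sl.getD j 0 + ((PySem.List.max? sl (fun x => x)).getD 0 + 1))
              else sl
            else sl)
          sl).length = sl.length := by
  intro js
  induction js with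
  | nil => intro sl cur _ h0 hcur; exact ⟨rfl, hcur, h0, rfl⟩
  | cons j js ih =>
    intro sl cur hrange h0 hcur
    by_cases hc : t.getD j ' ' = c
    · -- matching position: both update, running max tracks max of the list
      have hj : j < sl.length := hrange j (by simp)
      have hjget : sl.getD j 0 ∈ sl := by
        rw [List.getD_eq_getElem sl 0 hj]; exact List.getElem_mem hj
      have hjnn : 0 ≤ sl.getD j 0 := h0 _ hjget
      have hmax : 0 ≤ pvMaxD sl := le_trans hjnn (pv_le_maxD sl _ hjget)
      set w : Int := sl.getD j 0 + pvMaxD sl + 1 with hw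
      have hstepA :
          (let n : Int := 0
           if t.getD j ' ' = c then
             let n := n + 1
             if n > v then
               sl.set j (sl.getD j 0 + ((PySem.List.max? sl (fun x => x)).getD 0 + 1))
             else sl
           else sl) = sl.set j w := by
        simp only [if_pos hc, zero_add, if_pos hv]
        congr 1
        unfold pvMaxD at hw
        omega
      have hstepB :
          (if t.getD j ' ' = c then
             ((sl.set j (sl.getD j 0 + cur + 1), sl.getD j 0 + cur + 1) : List Int × Int)
           else (sl, cur)) = (sl.set j w, w) := by
        rw [if_pos hc, hcur, hw]
      have hlen' : ∀ j' ∈ js, j' < (sl.set j w).length := by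
        intro j' hj'; simpa using hrange j' (by simp [hj'])
      have h0' : ∀ x ∈ sl.set j w, 0 ≤ x := by
        intro x hx
        rcases List.mem_or_eq_of_mem_set hx with h | h
        · exact h0 x h
        · subst h; omega
      have hcur' : w = pvMaxD (sl.set j w) := by
        rw [pvMaxD_set sl j w hj]
        intro x hx
        have := pv_le_maxD sl x hx
        omega
      have := ih (sl.set j w) w hlen' h0' hcur'
      simp only [List.foldl_cons, hstepA, hstepB]
      refine ⟨this.1, this.2.1, this.2.2.1, ?_⟩
      rw [this.2.2.2]; simp
    · -- non-matching position: both states unchanged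
      have hstepA :
          (let n : Int := 0
           if t.getD j ' ' = c then
             let n := n + 1
             if n > v then
               sl.set j (sl.getD j 0 + ((PySem.List.max? sl (fun x => x)).getD 0 + 1))
             else sl
           else sl) = sl := by simp only [if_neg hc]
      have hstepB :
          (if t.getD j ' ' = c then
             ((sl.set j (sl.getD j 0 + cur + 1), sl.getD j 0 + cur + 1) : List Int × Int)
           else (sl, cur)) = (sl, cur) := by rw [if_neg hc]
      simp only [List.foldl_cons, hstepA, hstepB]
      exact ih sl cur (fun j' hj' => hrange j' (by simp [hj'])) h0 hcur

-- outer loops: A's dict-mutating fold versus B's (running max, seen counter) fold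
lemma pv_outer (t : List Char) (d0 : PySem.Dict String Int) :
    ∀ (s : List Char) (sl : List Int) (cur : Int) (dA seen : PySem.Dict String Int),
      sl.length = t.length →
      (∀ x ∈ sl, 0 ≤ x) →
      cur = pvMaxD sl →
      (∀ k, dA.getD k 0 = d0.getD k 0 + seen.getD k 0) →
      (s.foldl
        (fun (st : List Int × PySem.Dict String Int) c =>
          let sl := (List.range t.length).foldl
            (fun sl j =>
              let n : Int := 0
              if t.getD j ' ' = c then
                let n := n + 1
                if n > (st.2.get? (String.ofList [c])).getD 0 then
                  sl.set j (sl.getD j 0 + ((PySem.List.max? sl (fun x => x)).getD 0 + 1))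
                else sl
              else sl)
            st.1
          (sl, st.2.insert (String.ofList [c]) ((st.2.get? (String.ofList [c])).getD 0 + 1)))
        (sl, dA)).1
      = (s.foldl
          (fun (st : List Int × Int × PySem.Dict String Int) ch =>
            let key := String.ofList [ch]
            let p :=
              if (d0.get? key).getD 0 + st.2.2.getD key 0 < 1 then
                (List.range t.length).foldl
                  (fun (p : List Int × Int) j =>
                    if t.getD j ' ' = ch then
                      let v := p.1.getD j 0 + p.2 + 1
                      (p.1.set j v, v)
                    else p)
                  (st.1, st.2.1)
              else (st.1, st.2.1)
            (p.1, p.2, st.2.2.insert key (st.2.2.getD key 0 + 1)))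
          (sl, cur, seen)).1 := by
  intro s
  induction s with
  | nil => intro sl cur dA seen _ _ _ _; rfl
  | cons c s ih =>
    intro sl cur dA seen hlen h0 hcur hd
    have hgetA : (dA.get? (String.ofList [c])).getD 0 = dA.getD (String.ofList [c]) 0 :=
      (PySem.Dict.getD_eq_get?_getD dA (String.ofList [c]) 0).symm
    have hgetB : (d0.get? (String.ofList [c])).getD 0 = d0.getD (String.ofList [c]) 0 :=
      (PySem.Dict.getD_eq_get?_getD d0 (String.ofList [c]) 0).symm
    have hd' : ∀ k,
        (dA.insert (String.ofList [c]) ((dA.get? (String.ofList [c])).getD 0 + 1)).getD k 0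
          = d0.getD k 0
            + (seen.insert (String.ofList [c]) (seen.getD (String.ofList [c]) 0 + 1)).getD k 0 := by
      intro k
      rw [PySem.Dict.getD_insert, PySem.Dict.getD_insert, hgetA]
      by_cases hk : k = String.ofList [c]
      · subst hk
        rw [if_pos rfl, if_pos rfl, hd]
        ring
      · rw [if_neg hk, if_neg hk]
        exact hd k
    by_cases htrig : dA.getD (String.ofList [c]) 0 < 1
    · -- triggering row: both run the inner loop
      have hBcond : (d0.get? (String.ofList [c])).getD 0 + seen.getD (String.ofList [c]) 0 < 1 := by
        rw [hgetB, ← hd]; exact htrig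
      have hinner := pv_inner t c ((dA.get? (String.ofList [c])).getD 0)
        (by rw [hgetA]; omega)
        (List.range t.length) sl cur
        (by intro j hj; rw [hlen]; exact List.mem_range.mp hj)
        h0 hcur
      simp only [List.foldl_cons, if_pos hBcond]
      rw [← hinner.1]
      exact ih _ _ _ _ (by rw [hinner.2.2.2, hlen]) hinner.2.2.1 hinner.2.1 hd'
    · -- non-triggering row: A's inner loop changes nothing, B skips it
      have hBcond : ¬ ((d0.get? (String.ofList [c])).getD 0 + seen.getD (String.ofList [c]) 0 < 1) := by
        rw [hgetB, ← hd]; exact htrig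
      have hid : (List.range t.length).foldl
          (fun sl j =>
            let n : Int := 0
            if t.getD j ' ' = c then
              let n := n + 1
              if n > (dA.get? (String.ofList [c])).getD 0 then
                sl.set j (sl.getD j 0 + ((PySem.List.max? sl (fun x => x)).getD 0 + 1))
              else sl
            else sl)
          sl = sl := by
        apply pv_foldl_id
        intro a j
        have : ¬ ((0 : Int) + 1 > (dA.get? (String.ofList [c])).getD 0) := by
          rw [hgetA]; omega
        simp only [this, if_false]
        split <;> rfl
      simp only [List.foldl_cons, if_neg hBcond, hid]
      exact ih sl cur _ _ hlen h0 hcur hd'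

-- ===== VERDICT (by name: the statement is the Claim_ definition above) =====
theorem sort_DNA_spec : Claim_equal_sort_DNA := by
  intro dnalist dict _ _
  unfold Spec_sort_DNA sort_DNA sort_DNA_alt
  have hinit : (List.range ((((PySem.List.pyGet? dnalist 1).getD "").toList).length)).map
      (fun _ => (0 : Int))
      = List.replicate ((((PySem.List.pyGet? dnalist 1).getD "").toList).length) (0 : Int) := by
    rw [List.map_const', List.length_range]
  simp only [hinit]
  apply pv_outer
  · simp
  · intro x hx; rw [List.eq_of_mem_replicate hx]
  · rw [pvMaxD_all_zero]
    intro x hx; exact List.eq_of_mem_replicate hx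
  · intro k; simp [PySem.Dict.getD_empty]
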